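-- pv_equiv track=rewrite | github.com/xvshiting/SpellCor | utils.py | delete_2
-- ===== SOURCE A (Python) =====
-- def delete_1(word):
--     results = set()
--     for i in range(len(word)):
--         new_w = word[:i] + word[i + 1:]
--         if new_w:
--             results.add(new_w)
--     return results
--
-- def delete_2(word):
--     results = set()
--     for i in range(len(word)):
--         new_w = word[:i] + word[i + 1:]
--         if new_w:
--             results.update(delete_1(new_w))
--             results.add(new_w)
--     return results
-- ===== SOURCE B (Python) =====
-- def delete_2(word):
--     results = set()
--     n = len(word)
--     for i in range(n):
--         for j in range(i + 1, n):
--             new_w = word[:i] + word[i + 1:j] + word[j + 1:]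
--             if new_w:
--                 results.add(new_w)
--         new_w = word[:i] + word[i + 1:]
--         if new_w:
--             results.add(new_w)
--     return results
-- ===== Notes on version B (the rewrite author's own statement) =====
-- stated objective: simpler
-- what changed: B drops the recursive delete_1 helper (which A re-runs on every single-deletion string) and builds each two-character deletion directly with one nested loop over positions i < j, adding the single deletion of position i after its pairs.
import Mathlib
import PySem

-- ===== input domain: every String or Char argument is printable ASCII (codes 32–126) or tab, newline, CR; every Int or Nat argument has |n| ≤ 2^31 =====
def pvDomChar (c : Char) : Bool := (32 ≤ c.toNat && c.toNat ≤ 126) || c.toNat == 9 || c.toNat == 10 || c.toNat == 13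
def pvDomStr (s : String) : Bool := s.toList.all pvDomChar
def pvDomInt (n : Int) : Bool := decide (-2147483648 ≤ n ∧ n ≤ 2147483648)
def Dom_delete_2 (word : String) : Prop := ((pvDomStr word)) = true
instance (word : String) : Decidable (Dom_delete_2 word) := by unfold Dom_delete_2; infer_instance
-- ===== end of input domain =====

-- B replaces A's recursive delete_1 helper (recomputed for every single deletion) by one direct
-- double loop over deletion positions i < j; same result set, simpler decomposition.

-- ===== PORT A =====
-- strings are handled on the List Char side (String.ofList / .toList), exact for Python's slicing and '+'
def delete_1 (word : String) : List String :=
  (PySem.List.pyRange 0 (PySem.Str.len word) 1).foldl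
    (fun results i =>
      let new_w := PySem.List.slice word.toList none (some i) ++
                   PySem.List.slice word.toList (some (i + 1)) none
      if new_w ≠ [] then PySem.Set.add results (String.ofList new_w) else results)
    PySem.Set.empty

def delete_2 (word : String) : List String :=
  (PySem.List.pyRange 0 (PySem.Str.len word) 1).foldl
    (fun results i =>
      let new_w := PySem.List.slice word.toList none (some i) ++
                   PySem.List.slice word.toList (some (i + 1)) none
      if new_w ≠ [] then
        PySem.Set.add (PySem.Set.update results (delete_1 (String.ofList new_w))) (String.ofList new_w)
      else results)
    PySem.Set.empty

-- ===== PORT B =====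
def delete_2_alt (word : String) : List String :=
  (PySem.List.pyRange 0 (PySem.Str.len word) 1).foldl
    (fun results i =>
      let results :=
        (PySem.List.pyRange (i + 1) (PySem.Str.len word) 1).foldl
          (fun results j =>
            let new_w := PySem.List.slice word.toList none (some i) ++
                         PySem.List.slice word.toList (some (i + 1)) (some j) ++
                         PySem.List.slice word.toList (some (j + 1)) none
            if new_w ≠ [] then PySem.Set.add results (String.ofList new_w) else results)
          results
      let new_w := PySem.List.slice word.toList none (some i) ++
                   PySem.List.slice word.toList (some (i + 1)) none
      if new_w ≠ [] then PySem.Set.add results (String.ofList new_w) else results)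
    PySem.Set.empty

-- ===== PRECONDITION & SPEC =====
def Spec_delete_2 (word : String) (out : List String) : Prop := out = delete_2_alt word
instance (word : String) (out : List String) : Decidable (Spec_delete_2 word out) := by unfold Spec_delete_2; infer_instance

-- ===== CLAIM (what is proved, stated in full; the proofs are below) =====
def Claim_equal_delete_2 : Prop := ∀ (word : String), Dom_delete_2 word → Spec_delete_2 word (delete_2 word)

-- ===== LEMMAS AND PROOFS =====

-- deletion of one resp. two characters, on the char-list side
def d1 (cs : List Char) (i : Nat) : List Char := cs.take i ++ cs.drop (i + 1)
def d2 (cs : List Char) (i j : Nat) : List Char :=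
  cs.take i ++ (cs.drop (i + 1)).take (j - (i + 1)) ++ cs.drop (j + 1)

-- the strings A's delete_1 adds, in order
def A1list (w : List Char) : List String :=
  (((List.range w.length).map (d1 w)).filter (· ≠ [])).map String.ofList

-- what A's outer iteration i adds, in order
def ablock (cs : List Char) (i : Nat) : List String :=
  if d1 cs i = [] then [] else A1list (d1 cs i) ++ [String.ofList (d1 cs i)]

-- what B's outer iteration i adds, in order
def pairlist (cs : List Char) (i : Nat) : List String :=
  (((List.range' (i + 1) (cs.length - (i + 1))).map (d2 cs i)).filter (· ≠ [])).map String.ofList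

def bblock (cs : List Char) (i : Nat) : List String :=
  pairlist cs i ++ (if d1 cs i = [] then [] else [String.ofList (d1 cs i)])

-- the duplicates A's iteration i re-adds before B's material: the pairs {j,i} with j < i
def extras (cs : List Char) (i : Nat) : List String :=
  (((List.range i).map (fun j => d2 cs j i)).filter (· ≠ [])).map String.ofList

-- ---- generic Set facts ----
lemma set_add_of_not_mem {α : Type} [BEq α] [LawfulBEq α] (s : PySem.Set α) (x : α) (h : x ∉ s) :
    PySem.Set.add s x = s ++ [x] := by
  simp [PySem.Set.add, PySem.Set.contains, h]

lemma set_update_nil {α : Type} [BEq α] (s : PySem.Set α) : PySem.Set.update s [] = s := rfl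

lemma set_update_cons {α : Type} [BEq α] (s : PySem.Set α) (x : α) (l : List α) :
    PySem.Set.update s (x :: l) = PySem.Set.update (PySem.Set.add s x) l := rfl

lemma set_update_of_subset {α : Type} [BEq α] [LawfulBEq α] (l : List α) (s : PySem.Set α)
    (h : ∀ x ∈ l, x ∈ s) : PySem.Set.update s l = s := by
  induction l generalizing s with
  | nil => rfl
  | cons y l ih =>
    rw [set_update_cons, PySem.Set.add_of_mem (h y (by simp))]
    exact ih _ (fun x hx => h x (by simp [hx]))

lemma set_update_eq_append {α : Type} [BEq α] (l : List α) :
    ∀ s : PySem.Set α, ∃ r, PySem.Set.update s l = s ++ r := by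
  induction l with
  | nil => exact fun s => ⟨[], by simp⟩
  | cons x l ih =>
    intro s
    rw [set_update_cons]
    unfold PySem.Set.add
    split
    · exact ih s
    · obtain ⟨r, hr⟩ := ih (s ++ [x])
      exact ⟨[x] ++ r, by simp [hr]⟩

lemma set_update_update {α : Type} [BEq α] [LawfulBEq α] (l : List α) :
    ∀ s t : PySem.Set α, (∀ x ∈ t, x ∈ s) →
      PySem.Set.update s (PySem.Set.update t l) = PySem.Set.update s l := by
  induction l with
  | nil =>
    intro s t hsub
    simpa [set_update_nil] using set_update_of_subset t s hsub
  | cons x l ih =>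
    intro s t hsub
    rw [set_update_cons, set_update_cons]
    by_cases hxt : x ∈ t
    · rw [PySem.Set.add_of_mem hxt]
      rw [PySem.Set.add_of_mem (hsub x hxt)]
      exact ih s t hsub
    · rw [set_add_of_not_mem t x hxt]
      by_cases hxs : x ∈ s
      · rw [PySem.Set.add_of_mem hxs]
        exact ih s (t ++ [x]) (by
          intro y hy
          rcases List.mem_append.mp hy with hy | hy
          · exact hsub y hy
          · simp only [List.mem_singleton] at hy; subst hy; exact hxs)
      · rw [set_add_of_not_mem s x hxs]
        have hsub' : ∀ y ∈ t ++ [x], y ∈ s ++ [x] := by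
          intro y hy
          rcases List.mem_append.mp hy with hy | hy
          · exact List.mem_append_left _ (hsub y hy)
          · exact List.mem_append_right _ hy
        have main := ih (s ++ [x]) (t ++ [x]) hsub'
        obtain ⟨r, hr⟩ := set_update_eq_append l (t ++ [x])
        calc PySem.Set.update s (PySem.Set.update (t ++ [x]) l)
            = PySem.Set.update s (t ++ [x] ++ r) := by rw [hr]
          _ = PySem.Set.update (PySem.Set.update s t) ([x] ++ r) := by
              rw [← PySem.Set.update_append, List.append_assoc]
          _ = PySem.Set.update s ([x] ++ r) := by rw [set_update_of_subset t s hsub]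
          _ = PySem.Set.update (s ++ [x]) r := by
              rw [PySem.Set.update_append]
              simp [PySem.Set.update, set_add_of_not_mem s x hxs]
          _ = PySem.Set.update (s ++ [x]) (t ++ [x] ++ r) := by
              rw [PySem.Set.update_append,
                set_update_of_subset (t ++ [x]) (s ++ [x]) hsub']
          _ = PySem.Set.update (s ++ [x]) (PySem.Set.update (t ++ [x]) l) := by rw [hr]
          _ = PySem.Set.update (s ++ [x]) l := main

-- range(a, b) for natural bounds
lemma pyRange_natCast' : ∀ (m a b : Nat), b - a = m →
    PySem.List.pyRange (a : Int) (b : Int) 1 = (List.range' a m).map (fun (k : Nat) => (k : Int)) := by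
  intro m
  induction m with
  | zero =>
    intro a b hab
    have hba : ¬ ((a : Int) < (b : Int)) := by omega
    simp only [List.range']
    unfold PySem.List.pyRange
    simp [hba]
  | succ m ih =>
    intro a b hab
    have hlt : (a : Int) < (b : Int) := by omega
    rw [PySem.List.pyRange_one_cons hlt]
    have h2 : ((a : Int) + 1) = ((a + 1 : Nat) : Int) := by omega
    rw [h2, ih (a + 1) b (by omega)]
    simp [List.range'_succ]

lemma pyRange_zero' (b : Nat) :
    PySem.List.pyRange 0 (b : Int) 1 = (List.range' 0 b).map (fun (k : Nat) => (k : Int)) := by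
  simpa using pyRange_natCast' b 0 b (by omega)

-- the single-deletion slice pair, folded to d1
lemma slices_d1 (w : List Char) (k : Nat) :
    PySem.List.slice w none (some (k : Int)) ++ PySem.List.slice w (some ((k : Int) + 1)) none =
      d1 w k := by
  have hc : ((k : Int) + 1) = ((k + 1 : Nat) : Int) := by omega
  rw [hc, PySem.List.slice_to_natCast, PySem.List.slice_from_natCast]
  rfl

-- the same, with the start index already pushed into the cast
lemma slices_d1' (w : List Char) (k : Nat) :
    PySem.List.slice w none (some (k : Int)) ++
      PySem.List.slice w (some ((k + 1 : Nat) : Int)) none = d1 w k := by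
  rw [PySem.List.slice_to_natCast, PySem.List.slice_from_natCast]
  rfl

-- the pair-deletion slice triple, folded to d2
lemma slices_d2 (w : List Char) (k j : Nat) :
    PySem.List.slice w none (some (k : Int)) ++
      PySem.List.slice w (some ((k + 1 : Nat) : Int)) (some (j : Int)) ++
      PySem.List.slice w (some ((j : Int) + 1)) none = d2 w k j := by
  have hc : ((j : Int) + 1) = ((j + 1 : Nat) : Int) := by omega
  rw [hc, PySem.List.slice_to_natCast, PySem.List.slice_natCast,
    PySem.List.slice_from_natCast]
  rfl

-- A's/B's single-deletion loop body, folded over any index list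
lemma guardA_fold (w : List Char) : ∀ (idx : List Nat) (s : PySem.Set String),
    idx.foldl (fun (results : PySem.Set String) (k : Nat) =>
        if PySem.List.slice w none (some (k : Int)) ++
            PySem.List.slice w (some ((k : Int) + 1)) none ≠ [] then
          PySem.Set.add results (String.ofList (PySem.List.slice w none (some (k : Int)) ++
            PySem.List.slice w (some ((k : Int) + 1)) none))
        else results) s =
      PySem.Set.update s (((idx.map (d1 w)).filter (· ≠ [])).map String.ofList) := by
  intro idx
  induction idx with
  | nil => intro s; rfl
  | cons k idx ih =>
    intro s
    rw [List.foldl_cons, ih, List.map_cons, List.filter_cons]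
    simp only [slices_d1]
    by_cases h : d1 w k = []
    · simp [h]
    · simp [h]

-- B's pair-deletion loop body, folded over any index list
lemma guardB_fold (w : List Char) (k : Nat) : ∀ (idx : List Nat) (s : PySem.Set String),
    idx.foldl (fun (results : PySem.Set String) (j : Nat) =>
        if PySem.List.slice w none (some (k : Int)) ++
            PySem.List.slice w (some ((k + 1 : Nat) : Int)) (some (j : Int)) ++
            PySem.List.slice w (some ((j : Int) + 1)) none ≠ [] then
          PySem.Set.add results (String.ofList (PySem.List.slice w none (some (k : Int)) ++
            PySem.List.slice w (some ((k + 1 : Nat) : Int)) (some (j : Int)) ++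
            PySem.List.slice w (some ((j : Int) + 1)) none))
        else results) s =
      PySem.Set.update s (((idx.map (d2 w k)).filter (· ≠ [])).map String.ofList) := by
  intro idx
  induction idx with
  | nil => intro s; rfl
  | cons j idx ih =>
    intro s
    rw [List.foldl_cons, ih, List.map_cons, List.filter_cons]
    simp only [slices_d2]
    by_cases h : d2 w k j = []
    · simp [h]
    · simp [h]

lemma d1_length (cs : List Char) (i : Nat) (h : i < cs.length) :
    (d1 cs i).length = cs.length - 1 := by
  simp [d1]
  omega

lemma d1_eq_nil_iff (cs : List Char) (i : Nat) (h : i < cs.length) :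
    d1 cs i = [] ↔ cs.length = 1 := by
  rw [← List.length_eq_zero_iff, d1_length cs i h]
  omega

-- A's inner deletion at j < i is the pair deletion {j, i}
lemma d1_d1_lt (cs : List Char) (i j : Nat) (hji : j < i) (hi : i ≤ cs.length) :
    d1 (d1 cs i) j = d2 cs j i := by
  have hti : (cs.take i).length = i := by simp; omega
  unfold d1 d2
  rw [List.take_append, List.drop_append, hti]
  have h1 : (cs.take i).take j = cs.take j := by
    rw [List.take_take]
    congr 1
    omega
  have h2 : j - i = 0 := by omega
  have h3 : (cs.take i).drop (j + 1) = (cs.drop (j + 1)).take (i - (j + 1)) := List.drop_take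
  rw [h1, h2, h3]
  simp
  omega

-- A's inner deletion at j ≥ i is the pair deletion {i, j+1}
lemma d1_d1_ge (cs : List Char) (i j : Nat) (hij : i ≤ j) (hi : i ≤ cs.length) :
    d1 (d1 cs i) j = d2 cs i (j + 1) := by
  have hti : (cs.take i).length = i := by simp; omega
  unfold d1 d2
  rw [List.take_append, List.drop_append, hti]
  have h1 : (cs.take i).take j = cs.take i := by
    rw [List.take_take]
    congr 1
    omega
  have h2 : (cs.take i).drop (j + 1) = [] := by
    apply List.drop_eq_nil_of_le
    omega
  have h3 : (cs.drop (i + 1)).drop (j + 1 - i) = cs.drop (j + 1 + 1) := by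
    rw [List.drop_drop]
    congr 1
    omega
  rw [h1, h2, h3]
  have h4 : j + 1 - (i + 1) = j - i := by omega
  simp [h4]

lemma range'_shift : ∀ (m a : Nat), (List.range' a m).map (fun j => j + 1) = List.range' (a + 1) m := by
  intro m
  induction m with
  | zero => intro a; rfl
  | succ m ih => intro a; rw [List.range'_succ, List.range'_succ, List.map_cons, ih]

lemma ablock_decomp (cs : List Char) (i : Nat) (hi : i < cs.length) :
    ablock cs i = extras cs i ++ bblock cs i := by
  by_cases hd : d1 cs i = []
  · have hn : cs.length = 1 := (d1_eq_nil_iff cs i hi).mp hd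
    have hi0 : i = 0 := by omega
    subst hi0
    simp [ablock, bblock, extras, pairlist, hd, hn]
  · unfold ablock bblock
    rw [if_neg hd, if_neg hd]
    have hA : A1list (d1 cs i) = (extras cs i) ++ pairlist cs i := by
      unfold A1list
      rw [d1_length cs i hi]
      have hsplit : List.range (cs.length - 1) =
          List.range' 0 i ++ List.range' i (cs.length - 1 - i) := by
        rw [List.range_eq_range',
          show cs.length - 1 = i + (cs.length - 1 - i) from by omega,
          ← List.range'_append]
        norm_num
      rw [hsplit, List.map_append, List.filter_append, List.map_append]
      congr 1
      · -- the duplicates {j, i}, j < i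
        unfold extras
        congr 1
        congr 1
        have : List.range' 0 i = List.range i := by rw [List.range_eq_range']
        rw [this]
        apply List.map_congr_left
        intro j hj
        exact d1_d1_lt cs i j (List.mem_range.mp hj) (le_of_lt hi)
      · -- the new pairs {i, k}, k > i
        unfold pairlist
        congr 1
        congr 1
        have hmap : (List.range' i (cs.length - 1 - i)).map (d1 (d1 cs i)) =
            (List.range' i (cs.length - 1 - i)).map ((d2 cs i) ∘ (fun j => j + 1)) := by
          apply List.map_congr_left
          intro j hj
          have := List.mem_range'.mp hj
          obtain ⟨k, hk, hjk⟩ := this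
          have hij : i ≤ j := by omega
          exact d1_d1_ge cs i j hij (le_of_lt hi)
        rw [hmap, ← List.map_map, range'_shift]
        congr 2
        omega
    rw [hA, List.append_assoc]

-- port A's delete_1 in closed form
lemma delete_1_eq (w : List Char) :
    delete_1 (String.ofList w) = PySem.Set.update PySem.Set.empty (A1list w) := by
  unfold delete_1
  rw [PySem.Str.len_eq]
  have htl : (String.ofList w).toList = w := by simp
  rw [htl]
  rw [pyRange_zero' w.length]
  rw [List.foldl_map]
  simp only [guardA_fold w]
  unfold A1list
  rw [List.range_eq_range']

-- port A in block form
lemma portA_blocks (word : String) :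
    delete_2 word = (List.range' 0 word.toList.length).foldl
      (fun s i => PySem.Set.update s (ablock word.toList i)) PySem.Set.empty := by
  unfold delete_2
  rw [PySem.Str.len_eq]
  rw [pyRange_zero' word.toList.length]
  rw [List.foldl_map]
  apply List.foldl_ext
  intro s k hk
  simp only [slices_d1]
  show (if d1 word.toList k ≠ [] then
      PySem.Set.add (PySem.Set.update s (delete_1 (String.ofList (d1 word.toList k))))
        (String.ofList (d1 word.toList k))
    else s) = PySem.Set.update s (ablock word.toList k)
  rw [delete_1_eq]
  rw [set_update_update (A1list (d1 word.toList k)) s PySem.Set.empty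
    (by intro x hx; simp [PySem.Set.empty] at hx)]
  unfold ablock
  by_cases hw : d1 word.toList k = []
  · simp [hw]
  · rw [if_pos hw, if_neg hw, PySem.Set.update_append]
    rfl

-- port B in block form
lemma portB_blocks (word : String) :
    delete_2_alt word = (List.range' 0 word.toList.length).foldl
      (fun s i => PySem.Set.update s (bblock word.toList i)) PySem.Set.empty := by
  unfold delete_2_alt
  rw [PySem.Str.len_eq]
  rw [pyRange_zero' word.toList.length]
  rw [List.foldl_map]
  apply List.foldl_ext
  intro s k hk
  have hc : ((k : Int) + 1) = ((k + 1 : Nat) : Int) := by omega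
  simp only [hc]
  rw [pyRange_natCast' (word.toList.length - (k + 1)) (k + 1) word.toList.length (by rfl)]
  rw [List.foldl_map]
  simp only [guardB_fold word.toList k, slices_d1']
  show (if d1 word.toList k ≠ [] then
      PySem.Set.add (PySem.Set.update s
        ((((List.range' (k + 1) (word.toList.length - (k + 1))).map
          (d2 word.toList k)).filter (· ≠ [])).map String.ofList))
        (String.ofList (d1 word.toList k))
    else PySem.Set.update s
      ((((List.range' (k + 1) (word.toList.length - (k + 1))).map
        (d2 word.toList k)).filter (· ≠ [])).map String.ofList)) =
    PySem.Set.update s (bblock word.toList k)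
  unfold bblock pairlist
  by_cases hw : d1 word.toList k = []
  · rw [if_neg (by simpa using hw), if_pos hw]
    simp
  · rw [if_pos hw, if_neg hw, PySem.Set.update_append]
    rfl

-- the block sequences build the same set, by induction over the outer loop
lemma blocks_eq (cs : List Char) : ∀ (m k : Nat) (s : PySem.Set String), k + m = cs.length →
    (∀ j i', j < k → j < i' → i' < cs.length → d2 cs j i' ≠ [] →
      String.ofList (d2 cs j i') ∈ s) →
    (List.range' k m).foldl (fun s i => PySem.Set.update s (ablock cs i)) s =
      (List.range' k m).foldl (fun s i => PySem.Set.update s (bblock cs i)) s := by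
  intro m
  induction m with
  | zero => intro k s _ _; rfl
  | succ m ih =>
    intro k s hkm hinv
    have hk : k < cs.length := by omega
    rw [List.range'_succ, List.foldl_cons, List.foldl_cons]
    have hstep : PySem.Set.update s (ablock cs k) = PySem.Set.update s (bblock cs k) := by
      rw [ablock_decomp cs k hk, PySem.Set.update_append]
      congr 1
      apply set_update_of_subset
      intro x hx
      unfold extras at hx
      simp only [List.mem_map, List.mem_filter, List.mem_range] at hx
      obtain ⟨w, ⟨⟨j, hj, hw⟩, hne⟩, hxw⟩ := hx
      subst hw hxw
      exact hinv j k hj hj hk (by simpa using hne)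
    rw [hstep]
    apply ih (k + 1) _ (by omega)
    intro j i' hj hji hi' hne
    by_cases hjk : j < k
    · exact (PySem.Set.mem_update _ _ _).mpr (Or.inl (hinv j i' hjk hji hi' hne))
    · have hjeq : j = k := by omega
      subst hjeq
      apply (PySem.Set.mem_update _ _ _).mpr ∘ Or.inr
      unfold bblock pairlist
      apply List.mem_append_left
      have hmem1 : i' ∈ List.range' (j + 1) (cs.length - (j + 1)) :=
        List.mem_range'.mpr ⟨i' - (j + 1), by omega, by omega⟩
      have hmem2 := List.mem_map_of_mem (f := d2 cs j) hmem1
      have hmem3 : d2 cs j i' ∈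
          ((List.range' (j + 1) (cs.length - (j + 1))).map (d2 cs j)).filter (· ≠ []) :=
        List.mem_filter.mpr ⟨hmem2, by simpa using hne⟩
      exact List.mem_map_of_mem (f := String.ofList) hmem3

-- ===== VERDICT (by name: the statement is the Claim_ definition above) =====
theorem delete_2_spec : Claim_equal_delete_2 := by
  unfold Claim_equal_delete_2
  intro word _
  unfold Spec_delete_2
  rw [portA_blocks, portB_blocks]
  exact blocks_eq word.toList word.toList.length 0 PySem.Set.empty (by omega)
    (by intro j i' hj _ _ _; omega)
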